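-- pv_equiv track=rewrite | github.com/KeKoParis/fuzzy_inference | inference/inference.py | __find_suitable_sets__
-- ===== SOURCE A (Python) =====
-- def __find_suitable_sets__(sets: dict, rule: str):
--     """
--     Function find sets with the same elements.
--     :param sets:
--     :param rule:
--     :return:
--     """
--     fit_set = set()
--
--     for i in sets[rule[0]]:  # finds suitable sets elements
--         fit_set.add(i[0])
--
--     keys = sets.keys()
--
--     set_list = list()
--     for i in keys:  # find all set names with the same elements
--         curr_set = set()
--         for j in sets[i]:
--             curr_set.add(j[0])
--
--         if curr_set == fit_set:
--             set_list.append(i)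
--
--     return set_list
-- ===== SOURCE B (Python) =====
-- def __find_suitable_sets__(sets: dict, rule: str):
--     """Signature-index rewrite: group keys by their frozenset of first elements, then look up the rule's signature."""
--     fit_set = frozenset(j[0] for j in sets[rule[0]])
--     groups = {}
--     for key, rows in sets.items():
--         groups.setdefault(frozenset(j[0] for j in rows), []).append(key)
--     return groups.get(fit_set, [])
-- ===== Notes on version B (the rewrite author's own statement) =====
-- stated objective: alternative
-- what changed: Replaces the per-key set-equality test with a signature-to-keys index: each key is bucketed once under the frozenset of its rows' first elements and the result is a single dict lookup of the rule's signature.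
import Mathlib
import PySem

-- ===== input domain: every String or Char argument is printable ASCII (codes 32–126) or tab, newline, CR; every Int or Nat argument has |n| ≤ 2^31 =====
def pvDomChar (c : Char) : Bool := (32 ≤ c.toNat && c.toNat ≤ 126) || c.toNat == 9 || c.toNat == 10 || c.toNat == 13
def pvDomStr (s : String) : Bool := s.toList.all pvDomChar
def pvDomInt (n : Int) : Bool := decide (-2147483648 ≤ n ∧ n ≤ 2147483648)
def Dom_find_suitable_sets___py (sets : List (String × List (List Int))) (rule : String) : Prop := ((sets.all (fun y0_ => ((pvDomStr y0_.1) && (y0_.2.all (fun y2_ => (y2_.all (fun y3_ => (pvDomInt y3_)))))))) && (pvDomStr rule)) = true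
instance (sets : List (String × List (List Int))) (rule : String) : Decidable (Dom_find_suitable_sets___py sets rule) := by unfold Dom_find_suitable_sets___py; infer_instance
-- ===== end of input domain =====

-- B replaces A's per-key set-equality scan by a signature-to-keys index (group keys by their
-- set of first elements, then one lookup); same cost class, alternative structure.


-- ===== PORT A =====
-- transliteration of A: build fit_set by a loop of set.add, then for each key build
-- curr_set by the same loop and append the key when curr_set == fit_set.
def find_suitable_sets___py (sets : List (String × List (List Int))) (rule : String) : List String :=
  let d := PySem.Dict.ofList sets
  let key := match PySem.List.pyGet? rule.toList 0 with
             | some c => String.mk [c]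
             | none => ""          -- rule[0] raises IndexError on empty rule: outside Pre_
  -- sets[rule[0]]: a missing key raises KeyError in Python: outside Pre_
  let fit : PySem.Set Int :=
    (d.getD key []).foldl (fun s i => PySem.Set.add s (PySem.List.pyGetD i 0 0)) PySem.Set.empty
  d.keys.foldl (fun acc i =>
    let curr : PySem.Set Int :=
      (d.getD i []).foldl (fun s j => PySem.Set.add s (PySem.List.pyGetD j 0 0)) PySem.Set.empty
    if PySem.Set.equal curr fit then acc ++ [i] else acc) []

-- ===== PORT B =====
-- B-side helpers: an association list keyed by set-signatures, looked up with set equality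
def pvSig (rows : List (List Int)) : PySem.Set Int :=
  PySem.Set.ofList (rows.map (fun j => PySem.List.pyGetD j 0 0))

def pvAddGroup (gs : List (PySem.Set Int × List String)) (sig : PySem.Set Int) (k : String) :
    List (PySem.Set Int × List String) :=
  match gs with
  | [] => [(sig, [k])]
  | (s, ks) :: rest =>
      if PySem.Set.equal s sig then (s, ks ++ [k]) :: rest
      else (s, ks) :: pvAddGroup rest sig k

def pvLookup (gs : List (PySem.Set Int × List String)) (sig : PySem.Set Int) : List String :=
  match gs with
  | [] => []
  | (s, ks) :: rest => if PySem.Set.equal s sig then ks else pvLookup rest sig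

def find_suitable_sets___py_alt (sets : List (String × List (List Int))) (rule : String) : List String :=
  let d := PySem.Dict.ofList sets
  let key := match PySem.List.pyGet? rule.toList 0 with
             | some c => String.mk [c]
             | none => ""
  let fit := pvSig (d.getD key [])
  let groups := d.items.foldl (fun gs p => pvAddGroup gs (pvSig p.2) p.1) []
  pvLookup groups fit

-- ===== PRECONDITION & SPEC =====
-- Pre_ excludes exactly the inputs where the Python raises: an empty rule (IndexError on
-- rule[0]), a rule whose first character is not a key (KeyError), and any dict value
-- containing an empty inner list (IndexError on i[0]/j[0]).
def Pre_find_suitable_sets___py (sets : List (String × List (List Int))) (rule : String) : Prop :=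
  rule.toList ≠ [] ∧
  (PySem.Dict.ofList sets).contains (String.mk (rule.toList.take 1)) = true ∧
  ∀ p ∈ (PySem.Dict.ofList sets).items, ∀ j ∈ p.2, j ≠ []
instance (sets : List (String × List (List Int))) (rule : String) : Decidable (Pre_find_suitable_sets___py sets rule) := by unfold Pre_find_suitable_sets___py; infer_instance

def pvWitness_find_suitable_sets___py : (List (String × List (List Int))) × String :=
  ([("a", [[1], [2]]), ("b", [[2], [1]])], "a")

def Spec_find_suitable_sets___py (sets : List (String × List (List Int))) (rule : String) (out : List String) : Prop := out = find_suitable_sets___py_alt sets rule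
instance (sets : List (String × List (List Int))) (rule : String) (out : List String) : Decidable (Spec_find_suitable_sets___py sets rule out) := by unfold Spec_find_suitable_sets___py; infer_instance

-- ===== CLAIM (what is proved, stated in full; the proofs are below) =====
def Claim_equal_find_suitable_sets___py : Prop := ∀ (sets : List (String × List (List Int))) (rule : String), Dom_find_suitable_sets___py sets rule → Pre_find_suitable_sets___py sets rule → Spec_find_suitable_sets___py sets rule (find_suitable_sets___py sets rule)

-- ===== LEMMAS AND PROOFS =====

-- A's add-loop builds exactly the signature set pvSig
theorem sig_foldl (rows : List (List Int)) :
    rows.foldl (fun s i => PySem.Set.add s (PySem.List.pyGetD i 0 0)) PySem.Set.empty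
      = pvSig rows := by
  rw [pvSig, ← PySem.Set.update_map_eq_foldl_add]
  rw [show (PySem.Set.empty : PySem.Set Int) = [] from rfl, PySem.Set.update_nil_left]

theorem lookup_addGroup (gs : List (PySem.Set Int × List String)) (s : PySem.Set Int)
    (k : String) (fit : PySem.Set Int) :
    pvLookup (pvAddGroup gs s k) fit
      = pvLookup gs fit ++ (if PySem.Set.equal s fit then [k] else []) := by
  induction gs with
  | nil =>
      simp only [pvAddGroup, pvLookup]
      split_ifs with h <;> simp
  | cons hd tl ih =>
      obtain ⟨s', ks⟩ := hd
      simp only [pvAddGroup]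
      by_cases h1 : PySem.Set.equal s' s
      · simp only [h1, if_true, pvLookup]
        by_cases h2 : PySem.Set.equal s' fit
        · have h3 : PySem.Set.equal s fit := by
            rw [PySem.Set.equal_iff] at *
            intro x; rw [← h1 x]; exact h2 x
          simp [h2, h3]
        · have h3 : ¬ PySem.Set.equal s fit = true := by
            intro h3; apply h2
            rw [PySem.Set.equal_iff] at *
            intro x; rw [h1 x]; exact h3 x
          simp [h2, h3]
      · simp only [h1]
        by_cases h2 : PySem.Set.equal s' fit
        · have h3 : ¬ PySem.Set.equal s fit = true := by
            intro h3; apply h1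
            rw [PySem.Set.equal_iff] at *
            intro x; rw [h2 x]; exact (h3 x).symm
          simp [pvLookup, h2, h3]
        · simp [pvLookup, h2, ih]

theorem lookup_foldl_addGroup (ks : List String) (sig : String → PySem.Set Int)
    (fit : PySem.Set Int) (gs : List (PySem.Set Int × List String)) :
    pvLookup (ks.foldl (fun gs k => pvAddGroup gs (sig k) k) gs) fit
      = pvLookup gs fit ++ ks.filter (fun k => PySem.Set.equal (sig k) fit) := by
  induction ks generalizing gs with
  | nil => simp
  | cons k ks ih =>
      simp only [List.foldl_cons, List.filter_cons, ih, lookup_addGroup]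
      split_ifs with h <;> simp

-- ===== VERDICT (by name: the statement is the Claim_ definition above) =====
theorem find_suitable_sets___py_spec : Claim_equal_find_suitable_sets___py := by
  intro sets rule _ _
  unfold Spec_find_suitable_sets___py find_suitable_sets___py find_suitable_sets___py_alt
  simp only [sig_foldl]
  rw [PySem.Dict.items_eq_map_keys (PySem.Dict.ofList sets) (PySem.Dict.nodup_keys_ofList sets) []]
  rw [List.foldl_map]
  rw [lookup_foldl_addGroup _ (fun k => pvSig ((PySem.Dict.ofList sets).getD k []))]
  simp only [pvLookup, List.nil_append]
  rw [PySem.List.foldl_append_if_eq_filter]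
  simp
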